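-- pv_equiv track=rewrite | github.com/t37770451-ctrl/test3 | src/tools/tool_generator.py | select_endpoint
-- ===== SOURCE A (Python) =====
-- def select_endpoint(endpoints: list[dict], params: dict) -> dict:
--     """Select the most appropriate endpoint based on parameters."""
--     # Filter out empty or None values from params
--     valid_params = {k: v for k, v in params.items() if v not in (None, '', {}, [])}
--
--     # Sort endpoints by number of path parameters that have valid values
--     sorted_endpoints = sorted(
--         endpoints,
--         key=lambda ep: sum(
--             1
--             for p in ep['path'].split('/')
--             if p.startswith('{') and p.endswith('}') and p[1:-1] in valid_params
--         ),
--         reverse=True,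
--     )
--
--     # Return the first endpoint where all required path parameters have valid values
--     for endpoint in sorted_endpoints:
--         path_params = [
--             p[1:-1] for p in endpoint['path'].split('/') if p.startswith('{') and p.endswith('}')
--         ]
--         if all(param in valid_params for param in path_params):
--             return endpoint
--
--     # Fall back to simplest endpoint or first endpoint
--     return next(
--         (ep for ep in endpoints if not any('{' in p for p in ep['path'].split('/'))), endpoints[0]
--     )
-- ===== SOURCE B (Python) =====
-- def select_endpoint(endpoints: list[dict], params: dict) -> dict:
--     """Select the most appropriate endpoint based on parameters (single pass)."""
--     valid = {k for k, v in params.items() if v not in (None, '', {}, [])}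
--
--     best = None
--     best_score = -1
--     first_plain = None
--     for ep in endpoints:
--         segs = ep['path'].split('/')
--         path_params = [p[1:-1] for p in segs if p.startswith('{') and p.endswith('}')]
--         if all(p in valid for p in path_params) and len(path_params) > best_score:
--             best_score = len(path_params)
--             best = ep
--         if first_plain is None and not any('{' in p for p in segs):
--             first_plain = ep
--
--     if best is not None:
--         return best
--     if first_plain is not None:
--         return first_plain
--     return endpoints[0]
-- ===== Notes on version B (the rewrite author's own statement) =====
-- stated objective: alternative
-- what changed: Replaces A's stable descending sort plus a second scan by a single pass that keeps the best qualifying endpoint (strict '>' reproduces the stable tie-break) and the first brace-free endpoint for the fallback.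
import Mathlib
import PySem

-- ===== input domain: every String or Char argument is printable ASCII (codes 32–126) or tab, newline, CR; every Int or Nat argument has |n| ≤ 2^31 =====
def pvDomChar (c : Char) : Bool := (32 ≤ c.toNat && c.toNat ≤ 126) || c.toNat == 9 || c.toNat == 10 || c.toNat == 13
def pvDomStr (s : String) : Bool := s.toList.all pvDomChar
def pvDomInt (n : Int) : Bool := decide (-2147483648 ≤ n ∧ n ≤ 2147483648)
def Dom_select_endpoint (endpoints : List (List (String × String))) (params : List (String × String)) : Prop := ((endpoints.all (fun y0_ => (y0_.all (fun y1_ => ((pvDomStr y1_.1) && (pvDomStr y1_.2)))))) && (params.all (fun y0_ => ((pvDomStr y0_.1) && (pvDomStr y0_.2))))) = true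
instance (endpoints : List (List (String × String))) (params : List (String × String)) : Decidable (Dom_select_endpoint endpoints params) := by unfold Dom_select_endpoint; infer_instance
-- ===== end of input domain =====

-- B replaces A's sort-then-scan (stable descending sort by score, then a second scan, then a fallback scan)
-- by ONE pass that keeps the best qualifying endpoint (strict '>' preserves A's stable tie-break) and the
-- first brace-free endpoint. Equivalence is proved on the RETURN value; neither version mutates its arguments.

-- ===== PORT A =====
-- dict arguments are decoded with PySem.Dict.ofList (= Python dict(pairs): first position, last value).
def pvSegs (path : String) : List String := (PySem.Str.split? path "/").getD []  -- sep "/" ≠ "": split? is always `some` here, exact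
def pvIsParam (p : String) : Bool := PySem.Str.startswith p "{" && PySem.Str.endswith p "}"
def pvInner (p : String) : String := PySem.Str.slice p (some 1) (some (-1))      -- p[1:-1]
-- valid_params = {k: v for k, v in params.items() if v not in (None, '', {}, [])}; for str values the test is v != ''
def pvValidA (params : List (String × String)) : PySem.Dict String String :=
  (PySem.Dict.ofList params).items.foldl
    (fun d kv => if kv.2 ≠ "" then d.insert kv.1 kv.2 else d) PySem.Dict.empty
-- sort key: sum(1 for p in ep['path'].split('/') if p.startswith('{') and p.endswith('}') and p[1:-1] in valid_params)
-- ep['path'] is read with getD ""; Pre_ guarantees the key is present (A raises KeyError otherwise)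
def pvScoreA (valid : PySem.Dict String String) (ep : PySem.Dict String String) : Int :=
  ((pvSegs (ep.getD "path" "")).countP (fun p => pvIsParam p && valid.contains (pvInner p)) : Int)
def pvPathParams (ep : PySem.Dict String String) : List String :=
  ((pvSegs (ep.getD "path" "")).filter pvIsParam).map pvInner
def pvQualA (valid : PySem.Dict String String) (ep : PySem.Dict String String) : Bool :=
  (pvPathParams ep).all (fun k => valid.contains k)
def pvNoBrace (ep : PySem.Dict String String) : Bool :=
  !((pvSegs (ep.getD "path" "")).any (fun p => PySem.Str.isIn "{" p))

def select_endpoint (endpoints : List (List (String × String))) (params : List (String × String)) : List (String × String) :=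
  let valid := pvValidA params
  let eps := endpoints.map PySem.Dict.ofList
  let sortedEps := PySem.List.sorted eps (fun ep => pvScoreA valid ep) true
  match sortedEps.find? (fun ep => pvQualA valid ep) with
  | some ep => ep.items
  | none =>
    match eps.find? pvNoBrace with
    | some ep => ep.items
    | none => ((PySem.List.pyGet? eps 0).map PySem.Dict.items).getD []  -- endpoints[0]; Pre_ excludes [] (IndexError)

-- ===== PORT B =====
def pvValidB (params : List (String × String)) : PySem.Set String :=
  (PySem.Dict.ofList params).items.foldl
    (fun s kv => if kv.2 ≠ "" then PySem.Set.add s kv.1 else s) PySem.Set.empty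
def pvBestStep (valid : PySem.Set String) (b : Option (Int × PySem.Dict String String)) (ep : PySem.Dict String String) : Option (Int × PySem.Dict String String) :=
  let pps := pvPathParams ep
  if pps.all (fun k => PySem.Set.contains valid k) then
    match b with
    | none => some ((pps.length : Int), ep)
    | some (sc, m) => if (pps.length : Int) > sc then some ((pps.length : Int), ep) else some (sc, m)
  else b
-- 'if first_plain is None and not any('{' in p for p in segs): first_plain = ep'
def pvPlainStep (f : Option (PySem.Dict String String)) (ep : PySem.Dict String String) : Option (PySem.Dict String String) :=
  match f with
  | some m => some m
  | none => if pvNoBrace ep then some ep else none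

def select_endpoint_alt (endpoints : List (List (String × String))) (params : List (String × String)) : List (String × String) :=
  let valid := pvValidB params
  let eps := endpoints.map PySem.Dict.ofList
  let st := eps.foldl (fun s ep => (pvBestStep valid s.1 ep, pvPlainStep s.2 ep)) (none, none)
  match st.1 with
  | some (_, ep) => ep.items
  | none =>
    match st.2 with
    | some ep => ep.items
    | none => ((PySem.List.pyGet? eps 0).map PySem.Dict.items).getD []

-- ===== PRECONDITION & SPEC =====
-- Pre_ excludes exactly the inputs on which Python A raises: an empty endpoint list (IndexError on
-- endpoints[0]) and an endpoint dict without a 'path' key (KeyError in the sort key).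
def Pre_select_endpoint (endpoints : List (List (String × String))) (params : List (String × String)) : Prop :=
  endpoints ≠ [] ∧ ∀ ep ∈ endpoints, (PySem.Dict.ofList ep).contains "path" = true
instance (endpoints : List (List (String × String))) (params : List (String × String)) : Decidable (Pre_select_endpoint endpoints params) := by unfold Pre_select_endpoint; infer_instance
def pvWitness_select_endpoint : (List (List (String × String))) × (List (String × String)) :=
  ([[("path", "/users/{id}")], [("path", "/users")]], [("id", "7")])
def Spec_select_endpoint (endpoints : List (List (String × String))) (params : List (String × String)) (out : List (String × String)) : Prop := out = select_endpoint_alt endpoints params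
instance (endpoints : List (List (String × String))) (params : List (String × String)) (out : List (String × String)) : Decidable (Spec_select_endpoint endpoints params out) := by unfold Spec_select_endpoint; infer_instance

-- ===== CLAIM (what is proved, stated in full; the proofs are below) =====
def Claim_equal_select_endpoint : Prop := ∀ (endpoints : List (List (String × String))) (params : List (String × String)), Dom_select_endpoint endpoints params → Pre_select_endpoint endpoints params → Spec_select_endpoint endpoints params (select_endpoint endpoints params)

-- ===== LEMMAS AND PROOFS =====

-- the abstract best-so-far fold (strict '>' keeps the earliest maximal element)
def pvBestFoldFrom {α : Type} (key : α → Int) (q : α → Bool) (b : Option α) (xs : List α) : Option α :=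
  xs.foldl (fun b x => if q x then
      match b with
      | none => some x
      | some m => if key x > key m then some x else some m
    else b) b

-- inserting x into a descending-sorted list: the first q-element is x exactly when x beats the old one
theorem pvFind_insertBy {α : Type} (key : α → Int) (q : α → Bool) (x : α) (l : List α)
    (hs : l.Pairwise (fun a b => key b ≤ key a)) :
    List.find? q (PySem.List.insertBy (fun a b => decide (key b < key a)) x l) =
      (if q x then
        match List.find? q l with
        | none => some x
        | some m => if key x > key m then some x else some m
      else List.find? q l) := by
  induction l with
  | nil =>
    cases hq : q x <;> simp [PySem.List.insertBy, List.find?, hq]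
  | cons y ys ih =>
    rw [List.pairwise_cons] at hs
    obtain ⟨hy, hys⟩ := hs
    by_cases hlt : key y < key x
    · rw [show PySem.List.insertBy (fun a b => decide (key b < key a)) x (y :: ys) = x :: y :: ys from by
        simp [PySem.List.insertBy, hlt]]
      cases hq : q x
      · rw [List.find?_cons_of_neg (by simp [hq])]; simp
      · rw [List.find?_cons_of_pos hq]
        simp only [if_true]
        cases hf : List.find? q (y :: ys) with
        | none => rfl
        | some m =>
          have hm : m ∈ y :: ys := List.mem_of_find?_eq_some hf
          have hmle : key m ≤ key y := by
            rcases List.mem_cons.mp hm with h | h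
            · simp [h]
            · exact hy m h
          have hgt : key x > key m := lt_of_le_of_lt hmle hlt
          simp [hgt]
    · rw [show PySem.List.insertBy (fun a b => decide (key b < key a)) x (y :: ys)
          = y :: PySem.List.insertBy (fun a b => decide (key b < key a)) x ys from by
        simp [PySem.List.insertBy, hlt]]
      cases hqy : q y
      · rw [List.find?_cons_of_neg (by simp [hqy]), List.find?_cons_of_neg (by simp [hqy])]
        exact ih hys
      · rw [List.find?_cons_of_pos hqy, List.find?_cons_of_pos hqy]
        have hxle : ¬ (key x > key y) := by omega
        cases hq : q x <;> simp [hxle]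

theorem pvFind_sorted {α : Type} (key : α → Int) (q : α → Bool) (xs : List α) :
    List.find? q (PySem.List.sorted xs key true) = pvBestFoldFrom key q none xs := by
  induction xs using List.reverseRecOn with
  | nil => rfl
  | append_singleton xs x ih =>
    have h1 : PySem.List.sorted (xs ++ [x]) key true
        = PySem.List.insertBy (fun a b => decide (key b < key a)) x (PySem.List.sorted xs key true) := by
      rw [PySem.List.sorted_rev_eq_foldl_insertBy, PySem.List.sorted_rev_eq_foldl_insertBy,
        List.foldl_append]
      rfl
    rw [h1, pvFind_insertBy key q x _ (PySem.List.sorted_pairwise_rev xs key), ih]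
    unfold pvBestFoldFrom
    rw [List.foldl_append]
    rfl

theorem pvValidAux (l : List (String × String)) :
    ∀ (d : PySem.Dict String String) (s : PySem.Set String),
    (∀ k, d.contains k = PySem.Set.contains s k) →
    ∀ k, (l.foldl (fun d kv => if kv.2 ≠ "" then d.insert kv.1 kv.2 else d) d).contains k
      = PySem.Set.contains (l.foldl (fun s kv => if kv.2 ≠ "" then PySem.Set.add s kv.1 else s) s) k := by
  induction l with
  | nil => intro d s h k; exact h k
  | cons kv rest ih =>
    intro d s h k
    simp only [List.foldl_cons]
    by_cases hv : kv.2 ≠ ""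
    · simp only [if_pos hv]
      refine ih _ _ (fun k' => ?_) k
      rw [PySem.Dict.contains_insert, h k']
      rw [Bool.eq_iff_iff]
      simp only [Bool.or_eq_true, beq_iff_eq, PySem.Set.contains_iff, PySem.Set.mem_add]
      tauto
    · simp only [if_neg hv]
      exact ih _ _ h k

-- the two valid-parameter collections (dict in A, set in B) agree on membership
theorem pvValid_eq (params : List (String × String)) (k : String) :
    (pvValidA params).contains k = PySem.Set.contains (pvValidB params) k := by
  refine pvValidAux _ _ _ (fun k' => by simp) k

theorem pvQual_eq (params : List (String × String)) (ep : PySem.Dict String String) :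
    (pvPathParams ep).all (fun k => PySem.Set.contains (pvValidB params) k) = pvQualA (pvValidA params) ep := by
  rw [show (fun k => PySem.Set.contains (pvValidB params) k) = (fun k => (pvValidA params).contains k)
    from funext fun k => (pvValid_eq params k).symm]
  rfl

-- a qualifying endpoint's sort key equals its path-parameter count
theorem pvScore_of_qual (valid : PySem.Dict String String) (ep : PySem.Dict String String)
    (h : pvQualA valid ep = true) : pvScoreA valid ep = ((pvPathParams ep).length : Int) := by
  simp only [pvQualA, pvPathParams, List.all_eq_true, List.mem_map, List.mem_filter] at h
  simp only [pvScoreA, pvPathParams, List.length_map, ← List.countP_eq_length_filter]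
  have hc : (pvSegs (ep.getD "path" "")).countP (fun p => pvIsParam p && valid.contains (pvInner p))
      = (pvSegs (ep.getD "path" "")).countP pvIsParam := by
    refine List.countP_congr fun x hx => ?_
    constructor
    · intro hb; exact (Bool.and_elim_left hb)
    · intro hb
      have := h (pvInner x) ⟨x, ⟨hx, hb⟩, rfl⟩
      simp [hb, this]
  exact_mod_cast congrArg (Nat.cast : Nat → Int) hc

theorem pvBest_fold_rel (params : List (String × String)) (l : List (PySem.Dict String String))
    (b : Option (PySem.Dict String String)) (p : Option (Int × PySem.Dict String String))
    (hrel : match b with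
            | none => p = none
            | some m => pvQualA (pvValidA params) m = true ∧ p = some (pvScoreA (pvValidA params) m, m)) :
    (match pvBestFoldFrom (fun ep => pvScoreA (pvValidA params) ep) (fun ep => pvQualA (pvValidA params) ep) b l with
     | none => l.foldl (pvBestStep (pvValidB params)) p = none
     | some m => pvQualA (pvValidA params) m = true ∧ l.foldl (pvBestStep (pvValidB params)) p = some (pvScoreA (pvValidA params) m, m)) := by
  induction l generalizing b p with
  | nil =>
    cases b with
    | none => subst hrel; simp [pvBestFoldFrom]
    | some m => simp only [pvBestFoldFrom, List.foldl_nil]; exact ⟨hrel.1, hrel.2⟩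
  | cons x rest ih =>
    have hq := pvQual_eq params x
    have hBcons : List.foldl (pvBestStep (pvValidB params)) p (x :: rest)
        = List.foldl (pvBestStep (pvValidB params)) (pvBestStep (pvValidB params) p x) rest := rfl
    cases hqx : pvQualA (pvValidA params) x
    · rw [hqx] at hq
      have hA : pvBestFoldFrom (fun ep => pvScoreA (pvValidA params) ep) (fun ep => pvQualA (pvValidA params) ep) b (x :: rest)
          = pvBestFoldFrom (fun ep => pvScoreA (pvValidA params) ep) (fun ep => pvQualA (pvValidA params) ep) b rest := by
        simp [pvBestFoldFrom, hqx]
      have hstep : pvBestStep (pvValidB params) p x = p := by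
        simp only [pvBestStep]; rw [hq]; simp
      rw [hA, hBcons, hstep]
      exact ih b p hrel
    · rw [hqx] at hq
      have hlen : ((pvPathParams x).length : Int) = pvScoreA (pvValidA params) x := by
        exact (pvScore_of_qual (pvValidA params) x hqx).symm

      cases b with
      | none =>
        subst hrel
        have hAeq : pvBestFoldFrom (fun ep => pvScoreA (pvValidA params) ep) (fun ep => pvQualA (pvValidA params) ep) none (x :: rest)
            = pvBestFoldFrom (fun ep => pvScoreA (pvValidA params) ep) (fun ep => pvQualA (pvValidA params) ep) (some x) rest := by
          simp [pvBestFoldFrom, hqx]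
        have hstep : pvBestStep (pvValidB params) none x = some (pvScoreA (pvValidA params) x, x) := by
          simp only [pvBestStep, hq, if_true, ← hlen]
        rw [hAeq, hBcons, hstep]
        exact ih (some x) _ ⟨hqx, rfl⟩
      | some m =>
        obtain ⟨hqm, hp⟩ := hrel
        subst hp
        by_cases hcmp : pvScoreA (pvValidA params) x > pvScoreA (pvValidA params) m
        · have hAeq : pvBestFoldFrom (fun ep => pvScoreA (pvValidA params) ep) (fun ep => pvQualA (pvValidA params) ep) (some m) (x :: rest)
              = pvBestFoldFrom (fun ep => pvScoreA (pvValidA params) ep) (fun ep => pvQualA (pvValidA params) ep) (some x) rest := by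
            simp [pvBestFoldFrom, hqx, hcmp]
          have hstep : pvBestStep (pvValidB params) (some (pvScoreA (pvValidA params) m, m)) x
              = some (pvScoreA (pvValidA params) x, x) := by
            simp only [pvBestStep, hq, if_true]
            rw [hlen, if_pos hcmp]
          rw [hAeq, hBcons, hstep]
          exact ih (some x) _ ⟨hqx, rfl⟩
        · have hAeq : pvBestFoldFrom (fun ep => pvScoreA (pvValidA params) ep) (fun ep => pvQualA (pvValidA params) ep) (some m) (x :: rest)
              = pvBestFoldFrom (fun ep => pvScoreA (pvValidA params) ep) (fun ep => pvQualA (pvValidA params) ep) (some m) rest := by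
            simp [pvBestFoldFrom, hqx, hcmp]
          have hstep : pvBestStep (pvValidB params) (some (pvScoreA (pvValidA params) m, m)) x
              = some (pvScoreA (pvValidA params) m, m) := by
            simp only [pvBestStep, hq, if_true]
            rw [hlen, if_neg hcmp]
          rw [hAeq, hBcons, hstep]
          exact ih (some m) _ ⟨hqm, rfl⟩

theorem pvPlainAux (l : List (PySem.Dict String String))
    (f : Option (PySem.Dict String String) → PySem.Dict String String → Option (PySem.Dict String String))
    (hf : ∀ m e, f (some m) e = some m) (m : PySem.Dict String String) :
    l.foldl f (some m) = some m := by
  induction l with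
  | nil => rfl
  | cons y ys ih => rw [List.foldl_cons, hf]; exact ih

theorem pvPlain_fold (l : List (PySem.Dict String String)) :
    l.foldl pvPlainStep none = l.find? pvNoBrace := by
  induction l with
  | nil => rfl
  | cons y ys ih =>
    rw [List.foldl_cons]
    cases hny : pvNoBrace y
    · rw [show pvPlainStep none y = none from by simp [pvPlainStep, hny],
        List.find?_cons_of_neg (by simp [hny])]
      exact ih
    · rw [show pvPlainStep none y = some y from by simp [pvPlainStep, hny],
        List.find?_cons_of_pos hny, pvPlainAux ys pvPlainStep (fun m e => rfl) y]

-- ===== VERDICT (by name: the statement is the Claim_ definition above) =====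
theorem select_endpoint_spec : Claim_equal_select_endpoint := by
  intro endpoints params _hdom _hpre
  unfold Spec_select_endpoint select_endpoint select_endpoint_alt
  dsimp only
  rw [PySem.List.foldl_prod_mk (f := fun s ep => pvBestStep (pvValidB params) s ep)
      (g := fun s ep => pvPlainStep s ep)]
  rw [pvFind_sorted (fun ep => pvScoreA (pvValidA params) ep) (fun ep => pvQualA (pvValidA params) ep)]
  have hb2 := pvBest_fold_rel params (endpoints.map PySem.Dict.ofList) none none rfl
  cases hc : pvBestFoldFrom (fun ep => pvScoreA (pvValidA params) ep)
      (fun ep => pvQualA (pvValidA params) ep) none (List.map PySem.Dict.ofList endpoints) with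
  | some m =>
    rw [hc] at hb2
    dsimp only
    rw [hb2.2]
  | none =>
    rw [hc] at hb2
    dsimp only
    rw [hb2, pvPlain_fold]
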